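-- pv_equiv track=rewrite | github.com/iknoom/Problem_Solving | CodeJam/2021/Round1 A/B_small.py | solution
-- ===== SOURCE A (Python) =====
-- def solution(M, primes):
--     ret = 0
--     N = len(primes)
--     for i in range(1, (1 << N) - 1):
--         sum_p = 0
--         mul_p = 1
--         for j in range(N):
--             if i & (1 << j):
--                 sum_p += primes[j]
--             else:
--                 mul_p *= primes[j]
--         if sum_p == mul_p:
--             ret = max(ret, sum_p)
--     return ret
-- ===== SOURCE B (Python) =====
-- def solution(M, primes):
--     # DFS over assignments, sharing prefix sums/products instead of
--     # recomputing sum and product from scratch for every bitmask.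
--     n = len(primes)
--
--     def go(i, s, m, took_prod):
--         if i == n:
--             return s if took_prod and s == m else 0
--         p = primes[i]
--         return max(go(i + 1, s + p, m, took_prod), go(i + 1, s, m * p, True))
--
--     return go(0, 0, 1, False)
-- ===== Notes on version B (the rewrite author's own statement) =====
-- stated objective: alternative
-- what changed: Replaces the bitmask enumeration that recomputes the whole sum and product for each of the 2^N masks with a branching recursion over the list that extends shared prefix sums/products, tracking a 'some element on the product side' flag to exclude the all-sum assignment.
import Mathlib
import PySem

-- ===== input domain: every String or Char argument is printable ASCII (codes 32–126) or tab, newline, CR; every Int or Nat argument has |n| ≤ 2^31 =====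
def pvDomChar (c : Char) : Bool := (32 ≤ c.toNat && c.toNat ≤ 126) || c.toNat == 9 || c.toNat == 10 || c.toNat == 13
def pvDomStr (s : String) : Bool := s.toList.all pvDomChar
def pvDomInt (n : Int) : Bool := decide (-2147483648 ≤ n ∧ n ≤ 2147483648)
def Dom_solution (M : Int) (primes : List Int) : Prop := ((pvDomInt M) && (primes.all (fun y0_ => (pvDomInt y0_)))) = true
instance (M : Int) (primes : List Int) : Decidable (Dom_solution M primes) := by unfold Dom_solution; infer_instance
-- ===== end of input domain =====

-- B replaces A's per-bitmask recomputation of each sum and product with a branching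
-- recursion that extends shared prefix sums/products, tracking a took-product flag
-- to exclude the all-sum assignment.

-- ===== PORT A =====
-- inner 'for j in range(N)' loop of A, lifted to a named helper
def solutionInner (primes : List Int) (i : Int) : Int × Int :=
  (PySem.List.pyRange 0 (PySem.List.len primes)).foldl
    (fun sm j =>
      if PySem.Int.band i ((1 : Int) <<< j.toNat) ≠ 0 then
        (sm.1 + PySem.List.pyGetD primes j 0, sm.2)
      else
        (sm.1, sm.2 * PySem.List.pyGetD primes j 0))
    (0, 1)

def solution (_M : Int) (primes : List Int) : Int :=
  (PySem.List.pyRange 1 (((1 : Int) <<< primes.length) - 1)).foldl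
    (fun ret i =>
      let sm := solutionInner primes i
      if sm.1 = sm.2 then max ret sm.1 else ret)
    0

-- ===== PORT B =====
def solutionGo (primes : List Int) (s m : Int) (took : Bool) : Int :=
  match primes with
  | [] => if took && (s == m) then s else 0
  | p :: rest => max (solutionGo rest (s + p) m took) (solutionGo rest s (m * p) true)

def solution_alt (_M : Int) (primes : List Int) : Int :=
  solutionGo primes 0 1 false

-- ===== PRECONDITION & SPEC =====
def Spec_solution (M : Int) (primes : List Int) (out : Int) : Prop := out = solution_alt M primes
instance (M : Int) (primes : List Int) (out : Int) : Decidable (Spec_solution M primes out) := by unfold Spec_solution; infer_instance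

-- ===== CLAIM (what is proved, stated in full; the proofs are below) =====
def Claim_equal_solution : Prop := ∀ (M : Int) (primes : List Int), Dom_solution M primes → Spec_solution M primes (solution M primes)

-- ===== LEMMAS AND PROOFS =====

-- sum over the bits of k that are set / product over the bits that are clear
def spSum : List Int → Nat → Int
  | [], _ => 0
  | p :: l, k => if k % 2 = 1 then spSum l (k / 2) + p else spSum l (k / 2)

def spProd : List Int → Nat → Int
  | [], _ => 1
  | p :: l, k => if k % 2 = 1 then spProd l (k / 2) else spProd l (k / 2) * p

-- value contributed by assignment k (bit set = summand side, clear = factor side)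
def leafval (l : List Int) (s m : Int) (took : Bool) (k : Nat) : Int :=
  if (took = true ∨ k ≠ 2 ^ l.length - 1) ∧ s + spSum l k = m * spProd l k then
    s + spSum l k
  else 0

theorem lem_bit (k s : Nat) :
    (PySem.Int.band (k : Int) ((1 : Int) <<< (s : Int)) ≠ 0) ↔ (k >>> s) % 2 = 1 := by
  rw [Int.one_shiftLeft, PySem.Int.band_natCast, Nat.and_two_pow]
  rcases h : Nat.testBit k s <;>
    simp_all [Nat.testBit_eq_decide_div_mod_eq, Nat.shiftRight_eq_div_pow]

theorem lem_enum (k : Nat) (l : List Int) : ∀ (s : Nat) (a b : Int),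
    (PySem.List.enumerate l (s : Int)).foldl
      (fun sm jx =>
        if PySem.Int.band (k : Int) ((1 : Int) <<< jx.1.toNat) ≠ 0 then (sm.1 + jx.2, sm.2)
        else (sm.1, sm.2 * jx.2)) (a, b)
    = (a + spSum l (k >>> s), b * spProd l (k >>> s)) := by
  induction l with
  | nil => intro s a b; simp [PySem.List.enumerate, spSum, spProd]
  | cons p t ih =>
    intro s a b
    have hcons : PySem.List.enumerate (p :: t) (s : Int)
        = ((s : Int), p) :: PySem.List.enumerate t ((s : Int) + 1) := by
      simp [PySem.List.enumerate]
    have hcast : ((s : Int) + 1) = ((s + 1 : Nat) : Int) := by push_cast; ring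
    have hdiv : k >>> (s + 1) = (k >>> s) / 2 := Nat.shiftRight_succ k s
    rw [hcons]
    simp only [List.foldl_cons, Int.toNat_natCast]
    by_cases hb : (k >>> s) % 2 = 1
    · rw [if_pos ((lem_bit k s).2 hb), hcast, ih (s + 1) (a + p) b]
      have h1 : spSum (p :: t) (k >>> s) = spSum t (k >>> (s + 1)) + p := by
        simp [spSum, hb, hdiv]
      have h2 : spProd (p :: t) (k >>> s) = spProd t (k >>> (s + 1)) := by
        simp [spProd, hb, hdiv]
      rw [h1, h2]
      have h3 : a + p + spSum t (k >>> (s + 1)) = a + (spSum t (k >>> (s + 1)) + p) := by ring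
      rw [h3]
    · rw [if_neg (fun h => hb ((lem_bit k s).1 h)), hcast, ih (s + 1) a (b * p)]
      have h1 : spSum (p :: t) (k >>> s) = spSum t (k >>> (s + 1)) := by
        simp [spSum, hb, hdiv]
      have h2 : spProd (p :: t) (k >>> s) = spProd t (k >>> (s + 1)) * p := by
        simp [spProd, hb, hdiv]
      rw [h1, h2]
      have h3 : b * p * spProd t (k >>> (s + 1)) = b * (spProd t (k >>> (s + 1)) * p) := by ring
      rw [h3]

theorem inner_eq (primes : List Int) (k : Nat) :
    solutionInner primes (k : Int) = (spSum primes k, spProd primes k) := by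
  have h := lem_enum k primes 0 0 1
  simp only [Nat.cast_zero, Nat.shiftRight_zero, zero_add, one_mul] at h
  rw [PySem.List.enumerate_eq_map_pyRange primes (0 : Int), List.foldl_map] at h
  exact h

theorem range_pow_nonempty (n : Nat) : (Finset.range (2 ^ n)).Nonempty :=
  ⟨0, Finset.mem_range.2 (Nat.two_pow_pos n)⟩

theorem leafval_odd (p : Int) (t : List Int) (s m : Int) (took : Bool) (k : Nat) :
    leafval (p :: t) s m took (2 * k + 1) = leafval t (s + p) m took k := by
  have hpos := Nat.two_pow_pos t.length
  have hpow : 2 ^ (p :: t).length = 2 * 2 ^ t.length := by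
    rw [List.length_cons, pow_succ]; ring
  have h1 : (2 * k + 1) % 2 = 1 := by omega
  have h2 : (2 * k + 1) / 2 = k := by omega
  have hiff : (2 * k + 1 ≠ 2 ^ (p :: t).length - 1) ↔ (k ≠ 2 ^ t.length - 1) := by
    rw [hpow]; omega
  have hv : s + (spSum t k + p) = (s + p) + spSum t k := by ring
  simp only [leafval, spSum, spProd, h1, h2, hiff]
  simp [hv]

theorem leafval_even (p : Int) (t : List Int) (s m : Int) (took : Bool) (k : Nat) :
    leafval (p :: t) s m took (2 * k) = leafval t s (m * p) true k := by
  have hpos := Nat.two_pow_pos t.length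
  have hpow : 2 ^ (p :: t).length = 2 * 2 ^ t.length := by
    rw [List.length_cons, pow_succ]; ring
  have h1 : ¬ ((2 * k) % 2 = 1) := by omega
  have h2 : (2 * k) / 2 = k := by omega
  have hne : 2 * k ≠ 2 ^ (t.length + 1) - 1 := by
    rw [pow_succ]; omega
  have hv : m * (spProd t k * p) = (m * p) * spProd t k := by ring
  simp only [leafval, spSum, spProd, if_neg h1, h2]
  simp [hv, hne]

theorem rangeSplit (n : Nat) :
    Finset.range (2 ^ (n + 1))
      = ((Finset.range (2 ^ n)).image (fun k => 2 * k + 1))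
        ∪ ((Finset.range (2 ^ n)).image (fun k => 2 * k)) := by
  have hp : 2 ^ (n + 1) = 2 * 2 ^ n := by rw [pow_succ]; ring
  ext x
  simp only [Finset.mem_range, Finset.mem_union, Finset.mem_image, hp]
  constructor
  · intro hx
    rcases Nat.even_or_odd x with ⟨y, hy⟩ | ⟨y, hy⟩
    · exact Or.inr ⟨y, by omega, by omega⟩
    · exact Or.inl ⟨y, by omega, by omega⟩
  · rintro (⟨y, hy, rfl⟩ | ⟨y, hy, rfl⟩) <;> omega

theorem lem_go (l : List Int) : ∀ (s m : Int) (took : Bool),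
    solutionGo l s m took
      = (Finset.range (2 ^ l.length)).sup' (range_pow_nonempty _) (leafval l s m took) := by
  induction l with
  | nil =>
    intro s m took
    have h1 : Finset.range (2 ^ ([] : List Int).length) = {0} := by
      simp
    rw [Finset.sup'_congr _ h1 (fun x _ => rfl), Finset.sup'_singleton]
    simp only [leafval, spSum, spProd, solutionGo, List.length_nil, pow_zero]
    rcases took <;> rcases eq_or_ne s m with h | h <;> simp [h]
  | cons p t ih =>
    intro s m took
    have hsplit : Finset.range (2 ^ (p :: t).length)
        = ((Finset.range (2 ^ t.length)).image (fun k => 2 * k + 1))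
          ∪ ((Finset.range (2 ^ t.length)).image (fun k => 2 * k)) := by
      rw [List.length_cons]; exact rangeSplit t.length
    have h1 : ((Finset.range (2 ^ t.length)).image (fun k => 2 * k + 1)).Nonempty :=
      (range_pow_nonempty t.length).image (fun k => 2 * k + 1)
    have h2 : ((Finset.range (2 ^ t.length)).image (fun k => 2 * k)).Nonempty :=
      (range_pow_nonempty t.length).image (fun k => 2 * k)
    rw [Finset.sup'_congr (range_pow_nonempty (p :: t).length) hsplit (fun x _ => rfl),
      Finset.sup'_union h1 h2, Finset.sup'_image, Finset.sup'_image]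
    have hodd : (Finset.range (2 ^ t.length)).sup' h1.of_image
        ((leafval (p :: t) s m took) ∘ (fun k => 2 * k + 1))
        = (Finset.range (2 ^ t.length)).sup' (range_pow_nonempty _)
          (leafval t (s + p) m took) :=
      Finset.sup'_congr _ rfl (fun x _ => leafval_odd p t s m took x)
    have heven : (Finset.range (2 ^ t.length)).sup' h2.of_image
        ((leafval (p :: t) s m took) ∘ (fun k => 2 * k))
        = (Finset.range (2 ^ t.length)).sup' (range_pow_nonempty _)
          (leafval t s (m * p) true) :=
      Finset.sup'_congr _ rfl (fun x _ => leafval_even p t s m took x)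
    rw [hodd, heven, ← ih (s + p) m took, ← ih s (m * p) true]
    rfl

theorem lem_LA (q : Nat → Prop) [DecidablePred q] (f : Nat → Int) :
    ∀ (ks : List Nat) (r : Int), 0 ≤ r →
      ks.foldl (fun ret k => if q k then max ret (f k) else ret) r
        = ks.foldl (fun a k => max a (if q k then f k else 0)) r := by
  intro ks
  induction ks with
  | nil => intro r _; rfl
  | cons k t ih =>
    intro r hr
    simp only [List.foldl_cons]
    by_cases hq : q k
    · rw [if_pos hq, if_pos hq]
      exact ih (max r (f k)) (le_trans hr (le_max_left _ _))
    · rw [if_neg hq, if_neg hq, max_eq_left hr]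
      exact ih r hr

theorem lem_LM (f : Nat → Int) :
    ∀ (N : Nat) (hN : N ≠ 0) (r : Int),
      (List.range N).foldl (fun a k => max a (f k)) r
        = max r ((Finset.range N).sup' (Finset.nonempty_range_iff.2 hN) f) := by
  intro N
  induction N with
  | zero => intro h; exact absurd rfl h
  | succ n ih =>
    intro _ r
    by_cases hn : n = 0
    · subst hn
      rw [Finset.sup'_congr _ Finset.range_one (fun x _ => rfl), Finset.sup'_singleton]
      simp [List.range_succ]
    · rw [List.range_succ, List.foldl_append, ih hn r,
        Finset.sup'_congr _ Finset.range_add_one (fun x _ => rfl),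
        Finset.sup'_insert (Finset.nonempty_range_iff.2 hn)]
      show max (max r _) (f n) = max r (max (f n) _)
      rw [max_assoc, max_comm _ (f n)]

theorem spSum_zero (l : List Int) : spSum l 0 = 0 := by
  induction l with
  | nil => rfl
  | cons p t ih => simp [spSum, ih]

theorem lv_zero (l : List Int) : leafval l 0 1 false 0 = 0 := by
  simp [leafval, spSum_zero]

theorem lv_top (l : List Int) : leafval l 0 1 false (2 ^ l.length - 1) = 0 := by
  simp [leafval]

theorem main_eq (M : Int) (primes : List Int) :
    solution M primes = solution_alt M primes := by
  rcases primes with _ | ⟨p, _ | ⟨q, t⟩⟩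
  · -- []
    unfold solution solution_alt
    decide
  · -- [p]
    unfold solution solution_alt
    have hsh1 : ((1 : Int) <<< ([p] : List Int).length) - 1 = 1 := by
      rw [Int.shiftLeft_eq]; norm_num
    have hr : PySem.List.pyRange 1 1 = [] := by decide
    rw [hsh1, hr, List.foldl_nil]
    simp [solutionGo]
  · -- p :: q :: t, length ≥ 2
    set l := p :: q :: t with hl
    set N := l.length with hN
    have hN2 : 2 ≤ N := by simp [hN, hl]
    have h4 : 4 ≤ 2 ^ N := by
      calc (4 : Nat) = 2 ^ 2 := by norm_num
      _ ≤ 2 ^ N := Nat.pow_le_pow_right (by norm_num) hN2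
    have hmid : (2 ^ N - 2 : Nat) ≠ 0 := by omega
    have htn : (((2 ^ N : Nat) : Int) - 1) - 1 = ((2 ^ N - 2 : Nat) : Int) := by omega
    have hsh : ((1 : Int) <<< N) - 1 = ((2 ^ N : Nat) : Int) - 1 := by
      rw [Int.shiftLeft_eq]; push_cast; ring
    have hA : solution M l = (List.range (2 ^ N - 2)).foldl
        (fun ret k =>
          if spSum l (1 + k) = spProd l (1 + k) then max ret (spSum l (1 + k)) else ret) 0 := by
      unfold solution
      rw [← hN, hsh, PySem.List.pyRange_one, htn, Int.toNat_natCast]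
      simp only [List.foldl_map]
      apply PySem.List.foldl_congr_mem
      intro acc x _
      have hc : (1 : Int) + (x : Int) = ((1 + x : Nat) : Int) := by push_cast; ring
      rw [hc, inner_eq]
    rw [hA,
      lem_LA (fun k => spSum l (1 + k) = spProd l (1 + k)) (fun k => spSum l (1 + k))
        (List.range (2 ^ N - 2)) 0 le_rfl,
      lem_LM (fun k => if spSum l (1 + k) = spProd l (1 + k) then spSum l (1 + k) else 0)
        (2 ^ N - 2) hmid 0]
    have hB : solution_alt M l
        = (Finset.range (2 ^ N)).sup' (range_pow_nonempty _) (leafval l 0 1 false) := by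
      unfold solution_alt
      rw [lem_go l 0 1 false]
    rw [hB]
    have hset : Finset.range (2 ^ N)
        = insert 0 (insert (2 ^ N - 1)
            ((Finset.range (2 ^ N - 2)).image (fun k => 1 + k))) := by
      ext x
      simp only [Finset.mem_range, Finset.mem_insert, Finset.mem_image]
      constructor
      · intro hx
        by_cases h0 : x = 0
        · exact Or.inl h0
        · by_cases ht : x = 2 ^ N - 1
          · exact Or.inr (Or.inl ht)
          · exact Or.inr (Or.inr ⟨x - 1, by omega, by omega⟩)
      · rintro (rfl | rfl | ⟨y, hy, rfl⟩) <;> omega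
    have himg : ((Finset.range (2 ^ N - 2)).image (fun k => 1 + k)).Nonempty :=
      (Finset.nonempty_range_iff.2 hmid).image _
    have hins : (insert (2 ^ N - 1)
        ((Finset.range (2 ^ N - 2)).image (fun k => 1 + k))).Nonempty :=
      Finset.insert_nonempty _ _
    rw [Finset.sup'_congr _ hset (fun x _ => rfl), Finset.sup'_insert hins,
      Finset.sup'_insert himg, Finset.sup'_image, lv_zero, lv_top]
    have hmidcong : (Finset.range (2 ^ N - 2)).sup' himg.of_image
          ((leafval l 0 1 false) ∘ (fun k => 1 + k))
        = (Finset.range (2 ^ N - 2)).sup' (Finset.nonempty_range_iff.2 hmid)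
            (fun k => if spSum l (1 + k) = spProd l (1 + k) then spSum l (1 + k) else 0) := by
      refine Finset.sup'_congr _ rfl ?_
      intro x hx
      have hxlt : x < 2 ^ N - 2 := Finset.mem_range.1 hx
      have hne : ¬(1 + x = 2 ^ l.length - 1) := by rw [← hN]; omega
      simp [leafval, hne]
    rw [hmidcong]
    show ((0 : Int) ⊔ _) = (0 : Int) ⊔ ((0 : Int) ⊔ _)
    rw [← sup_assoc, sup_idem]

-- ===== VERDICT (by name: the statement is the Claim_ definition above) =====
theorem solution_spec : Claim_equal_solution := by
  intro M primes _
  unfold Spec_solution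
  exact main_eq M primes
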